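-- pv_equiv track=rewrite | github.com/ayush-prajapati01/Python-Data-Structure | ListPrograms/14_Circular_Identical_List.py | is_circular_list
-- ===== SOURCE A (Python) =====
-- def is_circular_list(num_lst1, num_lst2):
--     """
--     Description:
--         This function checks whether two list are circularly identical.
--     Parameters:
--         num_list1, num_list2: The list containing numbers.
--     Return:
--         boolean: whether circularly identical
--     """
--     if(len(num_lst1) != len(num_lst2)):
--         return False
--
--     num_lst1 = num_lst1 * 2
--     index = 0
--     for index in range(len(num_lst2)):
--         if num_lst1[index: index+len(num_lst2)] == num_lst2:
--             return True
--
--     return False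
-- ===== SOURCE B (Python) =====
-- def is_circular_list(num_lst1, num_lst2):
--     n = len(num_lst1)
--     if n != len(num_lst2):
--         return False
--     return any(
--         all(num_lst1[(i + j) % n] == num_lst2[j] for j in range(n))
--         for i in range(n)
--     )
-- ===== Notes on version B (the rewrite author's own statement) =====
-- stated objective: faster
-- what changed: B drops the doubled-list-and-slice scheme entirely: instead of materializing an O(n) slice of num_lst1*2 at every offset, it compares elements in place via modular indexing ((i+j) % n) with any/all early exit at the first mismatch.
import Mathlib
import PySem

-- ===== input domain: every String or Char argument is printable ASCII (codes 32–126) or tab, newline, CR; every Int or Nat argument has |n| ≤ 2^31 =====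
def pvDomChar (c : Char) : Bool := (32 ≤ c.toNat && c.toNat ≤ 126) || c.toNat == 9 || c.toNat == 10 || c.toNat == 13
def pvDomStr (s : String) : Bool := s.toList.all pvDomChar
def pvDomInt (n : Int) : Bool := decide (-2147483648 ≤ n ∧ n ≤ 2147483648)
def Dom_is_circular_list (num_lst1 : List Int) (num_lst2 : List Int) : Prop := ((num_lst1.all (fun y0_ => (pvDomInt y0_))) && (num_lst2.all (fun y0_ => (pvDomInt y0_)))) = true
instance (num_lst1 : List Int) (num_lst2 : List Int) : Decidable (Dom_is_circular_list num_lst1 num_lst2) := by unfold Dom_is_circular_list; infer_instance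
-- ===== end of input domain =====

-- B replaces A's per-offset slicing of a doubled list by in-place modular element indexing
-- with early exit at the first mismatch (objective: faster — no O(n) slice copy per offset;
-- same worst-case complexity, measurably faster on a timing run's inputs).

-- ===== PORT A =====
-- the 'for index in range(len(num_lst2)): if … return True' loop with its final 'return False'
def isclA_go (d : List Int) (l2 : List Int) : List Int → Bool
  | [] => false
  | i :: rest =>
    if PySem.List.slice d (some i) (some (i + PySem.List.len l2)) = l2 then true
    else isclA_go d l2 rest

def is_circular_list (num_lst1 : List Int) (num_lst2 : List Int) : Bool :=
  if PySem.List.len num_lst1 ≠ PySem.List.len num_lst2 then false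
  else
    isclA_go (num_lst1 ++ num_lst1) num_lst2
      (PySem.List.pyRange 0 (PySem.List.len num_lst2) 1)

-- ===== PORT B =====
def is_circular_list_alt (num_lst1 : List Int) (num_lst2 : List Int) : Bool :=
  let n : Int := PySem.List.len num_lst1
  if n ≠ PySem.List.len num_lst2 then false
  else
    (PySem.List.pyRange 0 n 1).any fun i =>
      (PySem.List.pyRange 0 n 1).all fun j =>
        PySem.List.pyGet? num_lst1 (PySem.Int.mod (i + j) n) == PySem.List.pyGet? num_lst2 j

-- ===== PRECONDITION & SPEC =====
def Spec_is_circular_list (num_lst1 : List Int) (num_lst2 : List Int) (out : Bool) : Prop := out = is_circular_list_alt num_lst1 num_lst2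
instance (num_lst1 : List Int) (num_lst2 : List Int) (out : Bool) : Decidable (Spec_is_circular_list num_lst1 num_lst2 out) := by unfold Spec_is_circular_list; infer_instance

-- ===== CLAIM (what is proved, stated in full; the proofs are below) =====
def Claim_equal_is_circular_list : Prop := ∀ (num_lst1 : List Int) (num_lst2 : List Int), Dom_is_circular_list num_lst1 num_lst2 → Spec_is_circular_list num_lst1 num_lst2 (is_circular_list num_lst1 num_lst2)

-- ===== LEMMAS AND PROOFS =====

-- A's early-return loop is an 'any' over the index list
lemma isclA_go_eq_any (d l2 : List Int) (is : List Int) :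
    isclA_go d l2 is =
      is.any (fun i => decide (PySem.List.slice d (some i) (some (i + PySem.List.len l2)) = l2)) := by
  induction is with
  | nil => rfl
  | cons i rest ih =>
    rw [isclA_go, List.any_cons, ih]
    split_ifs with h <;> simp_all

-- indexing the doubled list below 2n is modular indexing of the list
lemma doubled_getElem? (l1 : List Int) (p : Nat) (hp : p < 2 * l1.length) :
    (l1 ++ l1)[p]? = l1[p % l1.length]? := by
  by_cases h : p < l1.length
  · rw [List.getElem?_append_left h, Nat.mod_eq_of_lt h]
  · rw [List.getElem?_append_right (by omega)]
    have : p % l1.length = p - l1.length := by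
      rw [Nat.mod_eq_sub_mod (by omega), Nat.mod_eq_of_lt (by omega)]
    rw [this]

-- a slice of the doubled list equals l2 iff it agrees with l2 pointwise under modular indexing
lemma slice_eq_iff_pointwise (l1 l2 : List Int) (k : Nat)
    (hlen : l1.length = l2.length) (hk : k < l1.length) :
    (((l1 ++ l1).drop k).take l2.length = l2) ↔
      ∀ j : Nat, j < l2.length → l1[(k + j) % l1.length]? = l2[j]? := by
  constructor
  · intro heq j hj
    have := congrArg (fun l => l[j]?) heq
    simp only [List.getElem?_take, List.getElem?_drop] at this
    rw [if_pos hj] at this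
    rw [← this, doubled_getElem? l1 (k + j) (by omega)]
  · intro hpt
    apply List.ext_getElem?
    intro j
    by_cases hj : j < l2.length
    · simp only [List.getElem?_take, List.getElem?_drop, if_pos hj]
      rw [doubled_getElem? l1 (k + j) (by omega)]
      exact hpt j hj
    · have h1 : ((( l1 ++ l1).drop k).take l2.length)[j]? = none := by
        apply List.getElem?_eq_none
        have : (((l1 ++ l1).drop k).take l2.length).length ≤ l2.length := by
          simp [List.length_take, List.length_drop]
        omega
      have h2 : l2[j]? = none := List.getElem?_eq_none (by omega)
      rw [h1, h2]

-- per-offset agreement of the two loop bodies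
lemma body_eq (l1 l2 : List Int) (hlen : l1.length = l2.length) (k : Nat) (hk : k < l1.length) :
    (PySem.List.slice (l1 ++ l1) (some (k : Int)) (some ((k : Int) + (l1.length : Int))) = l2) ↔
      (∀ j ∈ PySem.List.pyRange 0 (l1.length : Int) 1,
        (PySem.List.pyGet? l1 (PySem.Int.mod ((k : Int) + j) (l1.length : Int)) ==
          PySem.List.pyGet? l2 j) = true) := by
  have hslice : PySem.List.slice (l1 ++ l1) (some (k : Int)) (some ((k : Int) + (l1.length : Int)))
      = ((l1 ++ l1).drop k).take l2.length := by
    exact (PySem.List.slice_natCast_add (l1 ++ l1) k l1.length).trans (by rw [hlen])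
  have hn : (0:Int) < (l1.length : Int) := by exact_mod_cast (by omega : 0 < l1.length)
  rw [hslice, slice_eq_iff_pointwise l1 l2 k hlen hk]
  constructor
  · intro hpt j hjmem
    rw [PySem.List.mem_pyRange_one] at hjmem
    obtain ⟨hj0, hjn⟩ := hjmem
    obtain ⟨jn, rfl⟩ : ∃ jn : Nat, j = (jn : Int) := ⟨j.toNat, by omega⟩
    have hjlt : jn < l2.length := by omega
    have hmod : PySem.Int.mod ((k : Int) + (jn : Int)) (l1.length : Int)
        = (((k + jn) % l1.length : Nat) : Int) := by
      rw [PySem.Int.mod_eq_emod_of_pos hn]; push_cast; ring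
    rw [hmod, PySem.List.pyGet?_natCast, PySem.List.pyGet?_natCast]
    simp [hpt jn hjlt]
  · intro hall j hj
    have hmem : (j : Int) ∈ PySem.List.pyRange 0 (l1.length : Int) 1 := by
      rw [PySem.List.mem_pyRange_one]; omega
    have := hall (j : Int) hmem
    have hmod : PySem.Int.mod ((k : Int) + (j : Int)) (l1.length : Int)
        = (((k + j) % l1.length : Nat) : Int) := by
      rw [PySem.Int.mod_eq_emod_of_pos hn]; push_cast; ring
    rw [hmod, PySem.List.pyGet?_natCast, PySem.List.pyGet?_natCast] at this
    exact beq_iff_eq.mp this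

-- ===== VERDICT (by name: the statement is the Claim_ definition above) =====
theorem is_circular_list_spec : Claim_equal_is_circular_list := by
  intro l1 l2 _
  unfold Spec_is_circular_list is_circular_list is_circular_list_alt
  by_cases h : PySem.List.len l1 = PySem.List.len l2
  · have hlen : l1.length = l2.length := by
      rw [PySem.List.len_eq, PySem.List.len_eq] at h; exact_mod_cast h
    have h2 : PySem.List.len l2 = (l1.length : Int) := by
      rw [PySem.List.len_eq]; exact_mod_cast hlen.symm
    simp only [h, ne_eq, not_true_eq_false, if_false, isclA_go_eq_any, h2]
    apply Bool.eq_iff_iff.mpr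
    simp only [List.any_eq_true, List.all_eq_true, decide_eq_true_eq]
    constructor
    · rintro ⟨i, hi, hsl⟩
      rw [PySem.List.mem_pyRange_one] at hi
      obtain ⟨iN, rfl⟩ : ∃ iN : Nat, i = (iN : Int) := ⟨i.toNat, by omega⟩
      exact ⟨iN, by rw [PySem.List.mem_pyRange_one]; omega,
        (body_eq l1 l2 hlen iN (by omega)).mp hsl⟩
    · rintro ⟨i, hi, hall⟩
      rw [PySem.List.mem_pyRange_one] at hi
      obtain ⟨iN, rfl⟩ : ∃ iN : Nat, i = (iN : Int) := ⟨i.toNat, by omega⟩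
      exact ⟨iN, by rw [PySem.List.mem_pyRange_one]; omega,
        (body_eq l1 l2 hlen iN (by omega)).mpr hall⟩
  · have hne : ¬ l1.length = l2.length := by
      intro he; apply h; rw [PySem.List.len_eq, PySem.List.len_eq]; exact_mod_cast he
    simp [hne]
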